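-- pv_equiv track=rewrite | github.com/tomster12/coding | Multi/Eyes/Crypto/Crypto/test_isomorphs.py | encode_caeser_progressive
-- ===== SOURCE A (Python) =====
-- def encode_caeser_progressive(pt, pt_alphabet, shift=3):
--     ct = ""
--     for l in pt:
--
--         if l == " ":
--             shift += 1
--             ct += " "
--
--         else:
--             index = pt_alphabet.index(l)
--             ct += pt_alphabet[(index + shift) % len(pt_alphabet)]
--
--     return ct
-- ===== SOURCE B (Python) =====
-- def encode_caeser_progressive(pt, pt_alphabet, shift=3):
--     # Pass 1: prefix table of the number of spaces strictly before each index.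
--     spaces_before = []
--     total = 0
--     for l in pt:
--         spaces_before.append(total)
--         if l == " ":
--             total += 1
--     # Pass 2: stateless per-character mapping using the prefix table.
--     n = len(pt_alphabet)
--     return "".join(
--         " " if l == " " else pt_alphabet[(pt_alphabet.index(l) + shift + s) % n]
--         for l, s in zip(pt, spaces_before)
--     )
-- ===== Notes on version B (the rewrite author's own statement) =====
-- stated objective: alternative
-- what changed: Replaces the single stateful scan with a mutating running shift by a two-phase structure: a prefix table of space counts computed first, then a stateless per-character join over zip(pt, table).
import Mathlib
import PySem

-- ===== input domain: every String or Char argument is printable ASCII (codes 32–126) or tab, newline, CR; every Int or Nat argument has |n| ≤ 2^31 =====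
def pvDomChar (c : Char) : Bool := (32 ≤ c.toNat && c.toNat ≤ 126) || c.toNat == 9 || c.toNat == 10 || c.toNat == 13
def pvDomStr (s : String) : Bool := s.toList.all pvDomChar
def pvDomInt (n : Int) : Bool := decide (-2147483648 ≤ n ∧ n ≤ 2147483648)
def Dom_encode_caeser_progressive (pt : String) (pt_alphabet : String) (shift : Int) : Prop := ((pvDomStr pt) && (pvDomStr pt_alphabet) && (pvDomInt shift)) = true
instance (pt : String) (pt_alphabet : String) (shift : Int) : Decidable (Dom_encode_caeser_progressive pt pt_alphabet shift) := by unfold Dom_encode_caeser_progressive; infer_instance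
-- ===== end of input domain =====

-- B replaces A's stateful running-shift scan by a precomputed prefix table of space
-- counts plus a stateless second pass (alternative decomposition, same cost).


-- ===== PORT A =====
-- pt_alphabet.index(l) for a one-character l is the first index of the char
-- (exact: ValueError = none, excluded by Pre_; default 0 never read under Pre_).
def pvAStep (alph : List Char) (st : Int × List Char) (l : Char) : Int × List Char :=
  if l = ' ' then
    (st.1 + 1, st.2 ++ [' '])
  else
    let index : Int := ((PySem.List.index? alph l).getD 0 : Nat)
    (st.1, st.2 ++ [PySem.List.pyGetD alph (PySem.Int.mod (index + st.1) (PySem.List.len alph)) ' '])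

def encode_caeser_progressive (pt : String) (pt_alphabet : String) (shift : Int) : String :=
  String.ofList (pt.toList.foldl (pvAStep pt_alphabet.toList) (shift, [])).2

-- ===== PORT B =====
-- Pass 1 of Source B: prefix table of space counts strictly before each index.
def pvBPrefStep (st : Int × List Int) (l : Char) : Int × List Int :=
  (if l = ' ' then st.1 + 1 else st.1, st.2 ++ [st.1])

def pvBPrefix (cs : List Char) : List Int :=
  (cs.foldl pvBPrefStep (0, [])).2

-- Pass 2 of Source B: stateless per-character mapping (same ValueError note as in A).
def pvBChar (alph : List Char) (shift : Int) (l : Char) (s : Int) : Char :=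
  if l = ' ' then ' '
  else PySem.List.pyGetD alph
    (PySem.Int.mod ((((PySem.List.index? alph l).getD 0 : Nat) : Int) + shift + s) (PySem.List.len alph)) ' '

def encode_caeser_progressive_alt (pt : String) (pt_alphabet : String) (shift : Int) : String :=
  String.ofList ((pt.toList.zip (pvBPrefix pt.toList)).map
    (fun p => pvBChar pt_alphabet.toList shift p.1 p.2))

-- ===== PRECONDITION & SPEC =====
-- Pre_ excludes exactly the inputs where Python A raises ValueError: a non-space
-- character of pt absent from pt_alphabet.
def Pre_encode_caeser_progressive (pt : String) (pt_alphabet : String) (shift : Int) : Prop :=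
  (pt.toList.all (fun l => l == ' ' || pt_alphabet.toList.contains l)) = true
instance (pt : String) (pt_alphabet : String) (shift : Int) : Decidable (Pre_encode_caeser_progressive pt pt_alphabet shift) := by unfold Pre_encode_caeser_progressive; infer_instance

def pvWitness_encode_caeser_progressive : String × String × Int := ("a b", "ab", 1)

def Spec_encode_caeser_progressive (pt : String) (pt_alphabet : String) (shift : Int) (out : String) : Prop := out = encode_caeser_progressive_alt pt pt_alphabet shift
instance (pt : String) (pt_alphabet : String) (shift : Int) (out : String) : Decidable (Spec_encode_caeser_progressive pt pt_alphabet shift out) := by unfold Spec_encode_caeser_progressive; infer_instance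

-- ===== CLAIM (what is proved, stated in full; the proofs are below) =====
def Claim_equal_encode_caeser_progressive : Prop := ∀ (pt : String) (pt_alphabet : String) (shift : Int), Dom_encode_caeser_progressive pt pt_alphabet shift → Pre_encode_caeser_progressive pt pt_alphabet shift → Spec_encode_caeser_progressive pt pt_alphabet shift (encode_caeser_progressive pt pt_alphabet shift)

-- ===== LEMMAS AND PROOFS =====

-- The common value both scans produce, as a structural recursion.
def pvOut (alph : List Char) : List Char → Int → List Char
  | [], _ => []
  | l :: ls, sh =>
      if l = ' ' then ' ' :: pvOut alph ls (sh + 1)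
      else
        PySem.List.pyGetD alph
          (PySem.Int.mod ((((PySem.List.index? alph l).getD 0 : Nat) : Int) + sh) (PySem.List.len alph)) ' '
          :: pvOut alph ls sh

theorem pvA_fold (alph : List Char) :
    ∀ (cs : List Char) (sh : Int) (acc : List Char),
      (cs.foldl (pvAStep alph) (sh, acc)).2 = acc ++ pvOut alph cs sh := by
  intro cs
  induction cs with
  | nil => intro sh acc; simp [pvOut]
  | cons l ls ih =>
      intro sh acc
      by_cases h : l = ' '
      · simp [List.foldl_cons, pvAStep, h, pvOut, ih]
      · simp [List.foldl_cons, pvAStep, h, pvOut, ih]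

def pvPrefList : List Char → Int → List Int
  | [], _ => []
  | l :: ls, t => t :: pvPrefList ls (if l = ' ' then t + 1 else t)

theorem pvBPref_fold :
    ∀ (cs : List Char) (t : Int) (acc : List Int),
      (cs.foldl pvBPrefStep (t, acc)).2 = acc ++ pvPrefList cs t := by
  intro cs
  induction cs with
  | nil => intro t acc; simp [pvPrefList]
  | cons l ls ih =>
      intro t acc
      simp [List.foldl_cons, pvBPrefStep, pvPrefList, ih]

theorem pvB_zip (alph : List Char) (shift : Int) :
    ∀ (cs : List Char) (t : Int),
      (cs.zip (pvPrefList cs t)).map (fun p => pvBChar alph shift p.1 p.2)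
        = pvOut alph cs (shift + t) := by
  intro cs
  induction cs with
  | nil => intro t; simp [pvPrefList, pvOut]
  | cons l ls ih =>
      intro t
      simp only [pvPrefList, List.zip_cons_cons, List.map_cons, ih]
      by_cases h : l = ' '
      · simp only [pvOut, pvBChar, h, if_true]
        rw [show shift + (t + 1) = shift + t + 1 by ring]
      · simp only [pvOut, pvBChar, h, if_false]
        rw [add_assoc]

-- ===== VERDICT (by name: the statement is the Claim_ definition above) =====
theorem encode_caeser_progressive_spec : Claim_equal_encode_caeser_progressive := by
  intro pt alph shift _ _
  unfold Spec_encode_caeser_progressive encode_caeser_progressive encode_caeser_progressive_alt pvBPrefix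
  rw [pvA_fold, pvBPref_fold, List.nil_append, List.nil_append, pvB_zip]
  norm_num
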